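-- pv_equiv track=rewrite | github.com/GuideboardLabs/foxforge | SourceCode/shared_tools/web_research.py | _domain_matches
-- ===== SOURCE A (Python) =====
-- def _domain_matches(domain: str, candidates: set[str] | tuple[str, ...]) -> bool:
--     root = str(domain or "").strip().lower()
--     if not root:
--         return False
--     for candidate in candidates:
--         item = str(candidate or "").strip().lower()
--         if not item:
--             continue
--         if root == item or root.endswith("." + item):
--             return True
--     return False
-- ===== SOURCE B (Python) =====
-- def _domain_matches(domain: str, candidates) -> bool:
--     root = str(domain or "").strip().lower()
--     if not root:
--         return False
--     cand = {item for item in (str(c or "").strip().lower() for c in candidates) if item}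
--     suffixes = [root]
--     for i, ch in enumerate(root):
--         if ch == '.':
--             suffixes.append(root[i + 1:])
--     return any(s in cand for s in suffixes)
-- ===== Notes on version B (the rewrite author's own statement) =====
-- stated objective: alternative
-- what changed: B inverts the traversal: instead of scanning candidates and calling endswith('.'+item) on root for each, it builds a set of normalized candidates once and enumerates root's dotted suffixes, answering by set membership.
import Mathlib
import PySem

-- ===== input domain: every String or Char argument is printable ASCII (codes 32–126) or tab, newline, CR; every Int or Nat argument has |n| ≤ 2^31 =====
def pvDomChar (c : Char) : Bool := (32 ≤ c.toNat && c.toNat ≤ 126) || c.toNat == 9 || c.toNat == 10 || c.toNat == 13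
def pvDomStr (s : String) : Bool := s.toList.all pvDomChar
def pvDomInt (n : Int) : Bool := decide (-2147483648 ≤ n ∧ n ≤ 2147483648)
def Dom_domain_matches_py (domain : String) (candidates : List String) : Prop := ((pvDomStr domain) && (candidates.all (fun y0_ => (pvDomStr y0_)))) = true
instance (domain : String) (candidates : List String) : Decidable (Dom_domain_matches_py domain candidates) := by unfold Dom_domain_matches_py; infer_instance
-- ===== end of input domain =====

-- B changes the traversal: instead of testing root.endswith("."+item) for each candidate,
-- it indexes the normalized candidates in a set once and looks up each dotted suffix of root
-- (objective: alternative data structure / decomposition; same exact results).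

-- ===== PORT A =====
-- A scans the candidates, normalizing each and testing equality / dotted-suffix with endswith.
def domain_matches_py (domain : String) (candidates : List String) : Bool :=
  let root := PySem.Chars.lower (PySem.Chars.strip domain.toList)
  if root = [] then false
  else candidates.any (fun candidate =>
    let item := PySem.Chars.lower (PySem.Chars.strip candidate.toList)
    if item = [] then false
    else root == item || PySem.Chars.endswith root ('.' :: item))

-- ===== PORT B =====
-- normalization used by Source B: str(c or "").strip().lower()
def pvNorm (s : String) : List Char := PySem.Chars.lower (PySem.Chars.strip s.toList)

-- Source B's loop 'for i, ch in enumerate(root): if ch == "." : suffixes.append(root[i+1:])',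
-- as the structural recursion over the characters (root[i+1:] is the tail after the dot).
def pvSufAfterDots : List Char → List (List Char)
  | [] => []
  | c :: rest => if c = '.' then rest :: pvSufAfterDots rest else pvSufAfterDots rest

def domain_matches_py_alt (domain : String) (candidates : List String) : Bool :=
  let root := pvNorm domain
  if root = [] then false
  else
    let cand := PySem.Set.ofList ((candidates.map pvNorm).filter (fun i => i ≠ []))
    (root :: pvSufAfterDots root).any (fun s => PySem.Set.contains cand s)

-- ===== PRECONDITION & SPEC =====
def Spec_domain_matches_py (domain : String) (candidates : List String) (out : Bool) : Prop := out = domain_matches_py_alt domain candidates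
instance (domain : String) (candidates : List String) (out : Bool) : Decidable (Spec_domain_matches_py domain candidates out) := by unfold Spec_domain_matches_py; infer_instance

-- ===== CLAIM (what is proved, stated in full; the proofs are below) =====
def Claim_equal_domain_matches_py : Prop := ∀ (domain : String) (candidates : List String), Dom_domain_matches_py domain candidates → Spec_domain_matches_py domain candidates (domain_matches_py domain candidates)

-- ===== LEMMAS AND PROOFS =====

-- membership in the dotted-suffix list is exactly being the part after some '.'
theorem mem_pvSufAfterDots (item l : List Char) :
    item ∈ pvSufAfterDots l ↔ ('.' :: item) <:+ l := by
  induction l with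
  | nil => simp [pvSufAfterDots]
  | cons c rest ih =>
    by_cases h : c = '.'
    · subst h
      simp [pvSufAfterDots, ih, List.suffix_cons_iff]
    · simp [pvSufAfterDots, h, ih, List.suffix_cons_iff, Ne.symm h]

theorem domain_matches_py_spec : Claim_equal_domain_matches_py := by
  intro domain candidates _
  unfold Spec_domain_matches_py domain_matches_py domain_matches_py_alt pvNorm
  set root := PySem.Chars.lower (PySem.Chars.strip domain.toList) with hroot
  by_cases hr : root = []
  · simp [hr]
  · simp only [hr, if_false]
    rw [Bool.eq_iff_iff]
    simp only [List.any_eq_true, PySem.Set.contains_iff, List.mem_cons,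
      PySem.Set.mem_ofList, List.mem_filter, List.mem_map, decide_eq_true_eq,
      mem_pvSufAfterDots]
    constructor
    · rintro ⟨c, hc, hp⟩
      by_cases hi : PySem.Chars.lower (PySem.Chars.strip c.toList) = []
      · simp [hi] at hp
      · simp only [if_neg hi, Bool.or_eq_true, beq_iff_eq,
          PySem.Chars.endswith_iff] at hp
        rcases hp with hp | hp
        · exact ⟨root, Or.inl rfl, ⟨⟨c, hc, hp.symm⟩, by simpa [hp] using hi⟩⟩
        · exact ⟨_, Or.inr hp, ⟨⟨c, hc, rfl⟩, by simpa using hi⟩⟩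
    · rintro ⟨s, hs, ⟨⟨c, hc, hnc⟩, hne⟩⟩
      refine ⟨c, hc, ?_⟩
      rw [hnc]
      have hne' : ¬ (s = []) := by simpa using hne
      simp only [if_neg hne', Bool.or_eq_true, beq_iff_eq,
        PySem.Chars.endswith_iff]
      rcases hs with hs | hs
      · exact Or.inl hs.symm
      · exact Or.inr hs

-- ===== VERDICT (by name: the statement is the Claim_ definition above) =====
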